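-- pv_equiv track=rewrite | github.com/giorgioleonardi/pug | core/architect.py | _parse_chew_config
-- ===== SOURCE A (Python) =====
-- from typing import Any, Optional
--
-- def _parse_chew_config(lines: list[str]) -> tuple[list[str], dict[str, Any]]:
--     """Extract BASE_URL, AUTH_TYPE, AUTH_HEADER, AUTH_ENV from start of response; return (remaining lines, config)."""
--     config: dict[str, Any] = {}
--     i = 0
--     for line in lines:
--         s = line.strip()
--         if s.startswith("BASE_URL:"):
--             config["base_url"] = s.split(":", 1)[1].strip().rstrip("/")
--         elif s.startswith("AUTH_TYPE:"):
--             config["auth_type"] = s.split(":", 1)[1].strip().lower()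
--         elif s.startswith("AUTH_HEADER:"):
--             config["auth_header"] = s.split(":", 1)[1].strip()
--         elif s.startswith("AUTH_ENV:"):
--             config["api_key_env"] = s.split(":", 1)[1].strip() or "API_KEY"
--         else:
--             break
--         i += 1
--     return lines[i:], config
-- ===== SOURCE B (Python) =====
-- _HEADERS = {
--     "BASE_URL": ("base_url", lambda v: v.rstrip("/")),
--     "AUTH_TYPE": ("auth_type", str.lower),
--     "AUTH_HEADER": ("auth_header", lambda v: v),
--     "AUTH_ENV": ("api_key_env", lambda v: v or "API_KEY"),
-- }
--
--
-- def _parse_header(line):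
--     """Parse one 'NAME: value' header line via the dispatch table, or None."""
--     key, sep, rest = line.strip().partition(":")
--     entry = _HEADERS.get(key)
--     if entry is not None and sep:
--         name, transform = entry
--         return name, transform(rest.strip())
--     return None
--
--
-- def _split_header_prefix(lines):
--     """Split lines into (parsed (key, value) pairs of the header prefix, remaining lines)."""
--     pairs = []
--     rest = lines
--     while rest:
--         item = _parse_header(rest[0])
--         if item is None:
--             break
--         pairs.append(item)
--         rest = rest[1:]
--     return pairs, rest
--
--
-- def _parse_chew_config(lines):
--     pairs, rest = _split_header_prefix(lines)
--     return rest, dict(pairs)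
-- ===== Notes on version B (the rewrite author's own statement) =====
-- stated objective: idiomatic
-- what changed: Replaces the startswith-chain loop with an index counter and end slice by a table-driven parser: each line is split once with partition(':'), the key is looked up in a static dispatch dict of (config key, transform), the parsed (key, value) pairs of the header prefix are collected together with the remaining lines, and the config dict is built at the end with dict(pairs).
import Mathlib
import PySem

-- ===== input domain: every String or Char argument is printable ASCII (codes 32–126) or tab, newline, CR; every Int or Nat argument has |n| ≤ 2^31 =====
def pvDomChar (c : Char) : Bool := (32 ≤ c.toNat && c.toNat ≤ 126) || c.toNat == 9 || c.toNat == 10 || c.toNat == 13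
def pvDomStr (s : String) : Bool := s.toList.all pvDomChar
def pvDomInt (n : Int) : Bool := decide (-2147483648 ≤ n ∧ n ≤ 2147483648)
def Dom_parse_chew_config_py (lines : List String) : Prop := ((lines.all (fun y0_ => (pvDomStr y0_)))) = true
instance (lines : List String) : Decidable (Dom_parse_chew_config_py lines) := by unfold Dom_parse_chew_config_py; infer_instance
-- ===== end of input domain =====

-- B replaces A's startswith-chain loop (index counter + end slice) by a partition-and-dispatch-table
-- parser that collects the (key, value) pairs of the header prefix and builds the dict at the end (idiomatic).

-- shared primitive helper: hand port of str.rstrip("/") (drop trailing '/' characters); exact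
def pvRstripSlash (s : String) : String :=
  String.ofList ((s.toList.reverse.dropWhile (fun c => c == '/')).reverse)

-- ===== PORT A =====
-- s.split(":", 1)[1]; A only evaluates it where s contains ':' (the split then has two pieces)
def pvSplitColonRest (s : String) : String :=
  match PySem.Str.splitMax? s ":" 1 with
  | some (_ :: v :: _) => v
  | _ => ""

def pvLoopA : List String → PySem.Dict String String → Int → PySem.Dict String String × Int
  | [], config, i => (config, i)
  | line :: rest, config, i =>
    let s := PySem.Str.strip line
    if PySem.Str.startswith s "BASE_URL:" then
      pvLoopA rest (config.insert "base_url" (pvRstripSlash (PySem.Str.strip (pvSplitColonRest s)))) (i + 1)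
    else if PySem.Str.startswith s "AUTH_TYPE:" then
      pvLoopA rest (config.insert "auth_type" (PySem.Str.lower (PySem.Str.strip (pvSplitColonRest s)))) (i + 1)
    else if PySem.Str.startswith s "AUTH_HEADER:" then
      pvLoopA rest (config.insert "auth_header" (PySem.Str.strip (pvSplitColonRest s))) (i + 1)
    else if PySem.Str.startswith s "AUTH_ENV:" then
      pvLoopA rest (config.insert "api_key_env"
        (if PySem.Str.strip (pvSplitColonRest s) = "" then "API_KEY" else PySem.Str.strip (pvSplitColonRest s))) (i + 1)
    else (config, i)

def parse_chew_config_py (lines : List String) : List String × (List (String × String)) :=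
  let r := pvLoopA lines PySem.Dict.empty 0
  (PySem.List.slice lines (some r.2) none, r.1.items)

-- ===== PORT B =====
-- hand port of str.partition(sep) for nonempty sep (split at the FIRST occurrence); exact there
def pvPartition (s sep : String) : String × String × String :=
  let i := PySem.Str.find s sep
  if i < 0 then (s, "", "")
  else (String.ofList (s.toList.take i.toNat), sep, String.ofList (s.toList.drop (i.toNat + sep.toList.length)))

-- the static dispatch dict _HEADERS, as a lookup function: config key and value transform
def pvHeaderTable (key : String) : Option (String × (String → String)) :=
  if key = "BASE_URL" then some ("base_url", fun v => pvRstripSlash v)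
  else if key = "AUTH_TYPE" then some ("auth_type", fun v => PySem.Str.lower v)
  else if key = "AUTH_HEADER" then some ("auth_header", fun v => v)
  else if key = "AUTH_ENV" then some ("api_key_env", fun v => if v = "" then "API_KEY" else v)
  else none

def pvParseHeader (line : String) : Option (String × String) :=
  let p := pvPartition (PySem.Str.strip line) ":"
  match pvHeaderTable p.1 with
  | some nf => if p.2.1 ≠ "" then some (nf.1, nf.2 (PySem.Str.strip p.2.2)) else none
  | none => none

def pvSplitHeaderPrefix : List (String × String) → List String → List (String × String) × List String
  | pairs, [] => (pairs, [])
  | pairs, line :: rest =>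
    match pvParseHeader line with
    | some item => pvSplitHeaderPrefix (pairs ++ [item]) rest
    | none => (pairs, line :: rest)

def parse_chew_config_py_alt (lines : List String) : List String × (List (String × String)) :=
  let r := pvSplitHeaderPrefix [] lines
  (r.2, (PySem.Dict.ofList r.1).items)

-- ===== PRECONDITION & SPEC =====
def Spec_parse_chew_config_py (lines : List String) (out : List String × (List (String × String))) : Prop := out = parse_chew_config_py_alt lines
instance (lines : List String) (out : List String × (List (String × String))) : Decidable (Spec_parse_chew_config_py lines out) := by unfold Spec_parse_chew_config_py; infer_instance

-- ===== CLAIM (what is proved, stated in full; the proofs are below) =====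
def Claim_equal_parse_chew_config_py : Prop := ∀ (lines : List String), Dom_parse_chew_config_py lines → Spec_parse_chew_config_py lines (parse_chew_config_py lines)

-- ===== LEMMAS AND PROOFS =====

-- A's per-line step: the branch chain of A's loop body, as an Option
def pvAStep (line : String) : Option (String × String) :=
  let s := PySem.Str.strip line
  if PySem.Str.startswith s "BASE_URL:" then some ("base_url", pvRstripSlash (PySem.Str.strip (pvSplitColonRest s)))
  else if PySem.Str.startswith s "AUTH_TYPE:" then some ("auth_type", PySem.Str.lower (PySem.Str.strip (pvSplitColonRest s)))
  else if PySem.Str.startswith s "AUTH_HEADER:" then some ("auth_header", PySem.Str.strip (pvSplitColonRest s))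
  else if PySem.Str.startswith s "AUTH_ENV:" then
    some ("api_key_env", if PySem.Str.strip (pvSplitColonRest s) = "" then "API_KEY" else PySem.Str.strip (pvSplitColonRest s))
  else none

-- the (key, value) pairs of the header prefix, per A's step
def pvPairs : List String → List (String × String)
  | [] => []
  | l :: ls => match pvAStep l with | some it => it :: pvPairs ls | none => []

theorem pv_find_go_cases (cs : List Char) : ∀ k : Nat,
    (PySem.Chars.find.go [':'] cs k = -1 ∧ ':' ∉ cs) ∨
    (∃ H t, cs = H ++ ':' :: t ∧ ':' ∉ H ∧ PySem.Chars.find.go [':'] cs k = (k : Int) + H.length) := by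
  induction cs with
  | nil => intro k; left; exact ⟨by simp [PySem.Chars.find.go], by simp⟩
  | cons c cs ih =>
    intro k
    by_cases hc : c = ':'
    · right
      refine ⟨[], cs, by simp [hc], by simp, ?_⟩
      subst hc
      simp [PySem.Chars.find.go, List.isPrefixOf]
    · have hgo : PySem.Chars.find.go [':'] (c :: cs) k = PySem.Chars.find.go [':'] cs (k + 1) := by
        simp [PySem.Chars.find.go, List.isPrefixOf, Ne.symm hc]
      rcases ih (k + 1) with ⟨h1, h2⟩ | ⟨H, t, hcs, hH, hfind⟩
      · left
        refine ⟨by rw [hgo, h1], ?_⟩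
        simp only [List.mem_cons, not_or]
        exact ⟨fun h => hc h.symm, h2⟩
      · right
        refine ⟨c :: H, t, by simp [hcs], ?_, ?_⟩
        · simp only [List.mem_cons, not_or]
          exact ⟨fun h => hc h.symm, hH⟩
        · rw [hgo, hfind]; simp only [List.length_cons]; push_cast; omega

theorem pv_decomp_unique : ∀ (H H₀ t t₀ : List Char), ':' ∉ H → ':' ∉ H₀ →
    H ++ ':' :: t = H₀ ++ ':' :: t₀ → H = H₀ ∧ t = t₀ := by
  intro H
  induction H with
  | nil =>
    intro H₀ t t₀ _ h₀ heq
    cases H₀ with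
    | nil => simpa using heq
    | cons c H₀' =>
      simp only [List.nil_append, List.cons_append, List.cons.injEq] at heq
      exact absurd (heq.1 ▸ List.mem_cons_self) h₀
  | cons c H' ih =>
    intro H₀ t t₀ hH h₀ heq
    cases H₀ with
    | nil =>
      simp only [List.cons_append, List.nil_append, List.cons.injEq] at heq
      exact absurd (heq.1 ▸ List.mem_cons_self) hH
    | cons c₀ H₀' =>
      simp only [List.cons_append, List.cons.injEq] at heq
      obtain ⟨h1, h2⟩ := ih H₀' t t₀ (fun h => hH (List.mem_cons_of_mem _ h))
        (fun h => h₀ (List.mem_cons_of_mem _ h)) heq.2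
      exact ⟨by rw [heq.1, h1], h2⟩

theorem pv_startswith_header_iff (H₀ t H : List Char) (h₀ : ':' ∉ H₀) (hH : ':' ∉ H) :
    (H ++ [':'] <+: H₀ ++ ':' :: t) ↔ H = H₀ := by
  constructor
  · rintro ⟨u, hu⟩
    have heq : H ++ ':' :: u = H₀ ++ ':' :: t := by simpa using hu
    exact (pv_decomp_unique H H₀ u t hH h₀ heq).1
  · rintro rfl
    exact ⟨t, by simp⟩

theorem pv_go_m0 (f : Nat) (t : List Char) (acc : List (List Char)) :
    PySem.Chars.splitOnMax.go [':'] f 0 t [] acc = (t :: acc).reverse := by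
  cases f with
  | zero => simp [PySem.Chars.splitOnMax.go]
  | succ f => cases t <;> simp [PySem.Chars.splitOnMax.go]

theorem pv_go_consume : ∀ (H : List Char), ':' ∉ H → ∀ (t cur : List Char)
    (acc : List (List Char)) (f : Nat), t.length + 1 ≤ f →
    PySem.Chars.splitOnMax.go [':'] (H.length + f) 1 (H ++ ':' :: t) cur acc =
      (t :: (cur.reverse ++ H) :: acc).reverse := by
  intro H
  induction H with
  | nil =>
    intro _ t cur acc f hf
    obtain ⟨f', rfl⟩ : ∃ f', f = f' + 1 := ⟨f - 1, by omega⟩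
    simp only [List.length_nil, List.nil_append, Nat.zero_add]
    show PySem.Chars.splitOnMax.go [':'] (f' + 1) 1 (':' :: t) cur acc = _
    rw [show PySem.Chars.splitOnMax.go [':'] (f' + 1) 1 (':' :: t) cur acc =
      PySem.Chars.splitOnMax.go [':'] f' 0 t [] (cur.reverse :: acc) by
        simp [PySem.Chars.splitOnMax.go, List.isPrefixOf]]
    rw [pv_go_m0]
    simp
  | cons c H' ih =>
    intro hH t cur acc f hf
    have hc : c ≠ ':' := fun h => hH (h ▸ List.mem_cons_self)
    have hH' : ':' ∉ H' := fun h => hH (List.mem_cons_of_mem _ h)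
    have hstep : PySem.Chars.splitOnMax.go [':'] ((c :: H').length + f) 1 ((c :: H') ++ ':' :: t) cur acc =
        PySem.Chars.splitOnMax.go [':'] (H'.length + f) 1 (H' ++ ':' :: t) (c :: cur) acc := by
      rw [show (c :: H').length + f = (H'.length + f) + 1 by simp [List.length_cons]; omega]
      simp [PySem.Chars.splitOnMax.go, List.isPrefixOf, Ne.symm hc]
    rw [hstep, ih hH' t (c :: cur) acc f hf]
    simp

theorem pv_split1 (H t : List Char) (hH : ':' ∉ H) :
    PySem.Chars.splitOnMax (H ++ ':' :: t) [':'] 1 = [H, t] := by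
  unfold PySem.Chars.splitOnMax
  rw [if_neg (by omega)]
  have hlen : (H ++ ':' :: t).length + 1 = H.length + (t.length + 2) := by simp; omega
  rw [show ((1 : Int).toNat) = 1 from rfl, hlen, pv_go_consume H hH t [] [] (t.length + 2) (by omega)]
  simp

theorem pv_step_eq (line : String) : pvParseHeader line = pvAStep line := by
  unfold pvParseHeader pvAStep pvPartition
  dsimp only
  have hfind : PySem.Str.find (PySem.Str.strip line) ":" =
      PySem.Chars.find.go [':'] (PySem.Str.strip line).toList 0 := by
    simp [PySem.Str.find, PySem.Chars.find]
  rcases pv_find_go_cases (PySem.Str.strip line).toList 0 with ⟨h1, h2⟩ | ⟨H₀, t, hcs, hH₀, hgo⟩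
  · -- no colon in the stripped line: B parses nothing, A's startswith chain all fail
    have hi : PySem.Str.find (PySem.Str.strip line) ":" = -1 := by rw [hfind, h1]
    have hsw : ∀ p : String, ':' ∈ p.toList → PySem.Str.startswith (PySem.Str.strip line) p = false := by
      intro p hc
      rw [PySem.Str.startswith, Bool.eq_false_iff, Ne, PySem.Chars.startswith_iff]
      exact fun hpre => h2 (hpre.subset hc)
    rw [hsw "BASE_URL:" (by decide), hsw "AUTH_TYPE:" (by decide),
      hsw "AUTH_HEADER:" (by decide), hsw "AUTH_ENV:" (by decide)]
    simp only [hi]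
    cases h : pvHeaderTable (PySem.Str.strip line) <;> simp [h]
  · -- first colon after prefix H₀: both sides dispatch on H₀
    have hi : PySem.Str.find (PySem.Str.strip line) ":" = (H₀.length : Int) := by
      rw [hfind, hgo]; simp
    have htake : (PySem.Str.strip line).toList.take H₀.length = H₀ := by
      rw [hcs]; exact List.take_left
    have hdrop : (PySem.Str.strip line).toList.drop (H₀.length + 1) = t := by
      rw [hcs, show H₀ ++ ':' :: t = (H₀ ++ [':']) ++ t by simp,
        show H₀.length + 1 = (H₀ ++ [':']).length by simp]
      exact List.drop_left
    have hsplit : pvSplitColonRest (PySem.Str.strip line) = String.ofList t := by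
      unfold pvSplitColonRest
      rw [PySem.Str.splitMax?]
      rw [show (PySem.Str.strip line).toList = H₀ ++ ':' :: t from hcs]
      rw [show (":" : String).toList = [':'] from rfl]
      rw [PySem.Chars.splitMax?, if_neg (by simp), pv_split1 H₀ t hH₀]
      simp
    have hkey : ∀ (p h : String), p.toList = h.toList ++ [':'] → ':' ∉ h.toList →
        (PySem.Str.startswith (PySem.Str.strip line) p = true ↔ h.toList = H₀) := by
      intro p h hp hh
      rw [PySem.Str.startswith, PySem.Chars.startswith_iff, hp, hcs]
      exact pv_startswith_header_iff H₀ t h.toList hH₀ hh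
    have hofl : ∀ (H : List Char) (h : String), (String.ofList H = h) ↔ H = h.toList := by
      intro H h
      constructor
      · intro he; rw [← he, String.toList_ofList]
      · intro he; rw [he, String.ofList_toList]
    have hnsw : ∀ (p h : String), p.toList = h.toList ++ [':'] → ':' ∉ h.toList → ¬ h.toList = H₀ →
        ¬ (PySem.Str.startswith (PySem.Str.strip line) p = true) :=
      fun p h hp hh hne hsw => hne ((hkey p h hp hh).mp hsw)
    simp only [hi, hofl]
    rw [if_neg (by omega)]
    simp only [Int.toNat_natCast, show (":" : String).toList.length = 1 from rfl, htake, hdrop]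
    by_cases hb : ("BASE_URL" : String).toList = H₀
    · rw [if_pos ((hkey "BASE_URL:" "BASE_URL" (by decide) (by decide)).mpr hb)]
      simp [pvHeaderTable, hofl, hb.symm, hsplit]
    · rw [if_neg (hnsw "BASE_URL:" "BASE_URL" (by decide) (by decide) hb)]
      by_cases ht : ("AUTH_TYPE" : String).toList = H₀
      · rw [if_pos ((hkey "AUTH_TYPE:" "AUTH_TYPE" (by decide) (by decide)).mpr ht)]
        simp [pvHeaderTable, hofl, ht.symm, hsplit, show H₀ ≠ ("BASE_URL" : String).toList from fun h => hb h.symm]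
      · rw [if_neg (hnsw "AUTH_TYPE:" "AUTH_TYPE" (by decide) (by decide) ht)]
        by_cases hh : ("AUTH_HEADER" : String).toList = H₀
        · rw [if_pos ((hkey "AUTH_HEADER:" "AUTH_HEADER" (by decide) (by decide)).mpr hh)]
          simp [pvHeaderTable, hofl, hh.symm, hsplit,
            show H₀ ≠ ("BASE_URL" : String).toList from fun h => hb h.symm,
            show H₀ ≠ ("AUTH_TYPE" : String).toList from fun h => ht h.symm]
        · rw [if_neg (hnsw "AUTH_HEADER:" "AUTH_HEADER" (by decide) (by decide) hh)]
          by_cases he : ("AUTH_ENV" : String).toList = H₀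
          · rw [if_pos ((hkey "AUTH_ENV:" "AUTH_ENV" (by decide) (by decide)).mpr he)]
            simp [pvHeaderTable, hofl, he.symm, hsplit,
              show H₀ ≠ ("BASE_URL" : String).toList from fun h => hb h.symm,
              show H₀ ≠ ("AUTH_TYPE" : String).toList from fun h => ht h.symm,
              show H₀ ≠ ("AUTH_HEADER" : String).toList from fun h => hh h.symm]
          · rw [if_neg (hnsw "AUTH_ENV:" "AUTH_ENV" (by decide) (by decide) he)]
            have n1 : ¬ (H₀ = ['B','A','S','E','_','U','R','L']) := fun h => hb (by rw [h]; decide)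
            have n2 : ¬ (H₀ = ['A','U','T','H','_','T','Y','P','E']) := fun h => ht (by rw [h]; decide)
            have n3 : ¬ (H₀ = ['A','U','T','H','_','H','E','A','D','E','R']) := fun h => hh (by rw [h]; decide)
            have n4 : ¬ (H₀ = ['A','U','T','H','_','E','N','V']) := fun h => he (by rw [h]; decide)
            simp [pvHeaderTable, hofl, n1, n2, n3, n4]

theorem pv_loopA_eq : ∀ (lines : List String) (d : PySem.Dict String String) (i : Int),
    pvLoopA lines d i = ((pvPairs lines).foldl (fun d p => d.insert p.1 p.2) d, i + (pvPairs lines).length) := by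
  intro lines
  induction lines with
  | nil => intro d i; simp [pvLoopA, pvPairs]
  | cons line rest ih =>
    intro d i
    have hcons : pvLoopA (line :: rest) d i = match pvAStep line with
        | some kv => pvLoopA rest (d.insert kv.1 kv.2) (i + 1)
        | none => (d, i) := by
      simp only [pvLoopA, pvAStep]
      split_ifs <;> rfl
    rw [hcons]
    cases h : pvAStep line with
    | none => simp [pvPairs, h]
    | some kv =>
      dsimp only
      rw [show pvPairs (line :: rest) = kv :: pvPairs rest by simp [pvPairs, h]]
      rw [ih]
      simp only [List.foldl_cons, List.length_cons, Prod.mk.injEq]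
      exact ⟨trivial, by push_cast; ring⟩

set_option maxHeartbeats 1000000 in
theorem pv_split_eq : ∀ (lines : List String) (pairs : List (String × String)),
    pvSplitHeaderPrefix pairs lines = (pairs ++ pvPairs lines, lines.drop (pvPairs lines).length) := by
  intro lines
  induction lines with
  | nil =>
    intro pairs
    show (pairs, ([] : List String)) = (pairs ++ pvPairs [], List.drop (pvPairs []).length [])
    simp [pvPairs]
  | cons line rest ih =>
    intro pairs
    have hred : pvSplitHeaderPrefix pairs (line :: rest) =
        (match pvParseHeader line with
         | some item => pvSplitHeaderPrefix (pairs ++ [item]) rest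
         | none => (pairs, line :: rest)) := rfl
    rw [hred]
    cases h : pvAStep line with
    | none =>
      rw [show pvParseHeader line = none by rw [pv_step_eq, h]]
      rw [show pvPairs (line :: rest) = [] by simp [pvPairs, h]]
      simp
    | some it =>
      rw [show pvParseHeader line = some it by rw [pv_step_eq, h]]
      rw [show pvPairs (line :: rest) = it :: pvPairs rest by simp [pvPairs, h]]
      dsimp only
      rw [ih]
      simp

-- ===== VERDICT (by name: the statement is the Claim_ definition above) =====
theorem parse_chew_config_py_spec : Claim_equal_parse_chew_config_py := by
  intro lines _
  unfold Spec_parse_chew_config_py parse_chew_config_py parse_chew_config_py_alt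
  rw [pv_loopA_eq, pv_split_eq]
  simp [PySem.Dict.ofList, PySem.Dict.update, PySem.List.slice_from_natCast]
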